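-- pv_equiv track=rewrite | github.com/design4music/sni-platform | v3/taxonomy_tools/prune_aliases.py | find_subsumed_aliases
-- ===== SOURCE A (Python) =====
-- def is_subsumed_by(alias_a_tokens, alias_b_tokens):
--     """
--     Check if alias A subsumes alias B.
--
--     Returns True if:
--     - All tokens of A are in B
--     - A has fewer tokens than B (proper subset)
--
--     This means A will ALWAYS match everything B matches.
--
--     Examples:
--     - is_subsumed_by({ai}, {ai, infrastructure}) → True
--     - is_subsumed_by({ceasefire}, {temporary, ceasefire}) → True
--     - is_subsumed_by({human, rights}, {human, rights, violations}) → True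
--     - is_subsumed_by({ai}, {ai}) → False (same, not proper subset)
--     """
--     return alias_a_tokens < alias_b_tokens  # Proper subset check
--
-- def find_subsumed_aliases(aliases, min_keep=1):
--     """
--     Find aliases that are subsumed by other aliases in the same group.
--
--     Algorithm:
--     1. Sort aliases by token count ascending (check shorter ones first)
--     2. For each alias B, check if any shorter alias A subsumes it
--     3. Mark B as redundant if subsumed
--
--     Returns:
--         (kept_aliases, subsumed_aliases)
--     """
--     # Sort by token count ascending, then by alias length
--     sorted_aliases = sorted(aliases, key=lambda x: (len(x[2]), len(x[0])))
--
--     kept = []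
--     subsumed = []
--
--     for alias, normalized, tokens, taxonomy_id in sorted_aliases:
--         # Check if this alias is subsumed by any kept alias
--         is_redundant = False
--         subsumed_by = None
--
--         for kept_alias, kept_normalized, kept_tokens, kept_taxonomy_id in kept:
--             if is_subsumed_by(kept_tokens, tokens):
--                 is_redundant = True
--                 subsumed_by = kept_alias
--                 break
--
--         if is_redundant:
--             subsumed.append((alias, normalized, tokens, taxonomy_id, subsumed_by))
--         else:
--             kept.append((alias, normalized, tokens, taxonomy_id))
--
--     # Enforce min_keep constraint
--     if len(kept) < min_keep and subsumed:
--         # Move subsumed back to kept until min_keep satisfied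
--         while len(kept) < min_keep and subsumed:
--             alias, normalized, tokens, taxonomy_id, _ = subsumed.pop(0)
--             kept.append((alias, normalized, tokens, taxonomy_id))
--
--     return kept, subsumed
-- ===== SOURCE B (Python) =====
-- def find_subsumed_aliases(aliases, min_keep=1):
--     """Same result as the kept-rescanning version, via an inverted token index.
--
--     Key facts making this exact:
--     - an alias is redundant iff ANY earlier alias (in sorted order) has a
--       proper-subset token set; the earliest such alias is necessarily kept,
--       and it is exactly the attribution the kept-scan reports;
--     - a non-empty subset of `tokens` shares at least one token with it, so
--       indexing every earlier alias under each of its tokens (plus a separate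
--       list for empty token sets) yields a complete candidate set; the hit
--       with the smallest position is the attribution.
--     """
--     sorted_aliases = sorted(aliases, key=lambda x: (len(x[2]), len(x[0])))
--
--     index = {}    # token -> [(position, alias, token set), ...] containing that token
--     empties = []  # entries with an empty token set (subsume every non-empty set)
--     kept = []
--     subsumed = []
--
--     for pos, (alias, normalized, tokens, taxonomy_id) in enumerate(sorted_aliases):
--         toks = sorted(tokens)
--         best = None
--         for cand in empties + [c for t in toks for c in index.get(t, [])]:
--             if cand[2] < tokens and (best is None or cand[0] < best[0]):
--                 best = cand
--         if best is not None:
--             subsumed.append((alias, normalized, tokens, taxonomy_id, best[1]))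
--         else:
--             kept.append((alias, normalized, tokens, taxonomy_id))
--         entry = (pos, alias, tokens)
--         if toks:
--             for t in toks:
--                 index.setdefault(t, []).append(entry)
--         else:
--             empties.append(entry)
--
--     if len(kept) < min_keep and subsumed:
--         need = min_keep - len(kept)
--         moved, subsumed = subsumed[:need], subsumed[need:]
--         kept += [(a, n, t, x) for (a, n, t, x, _) in moved]
--
--     return kept, subsumed
-- ===== Notes on version B (the rewrite author's own statement) =====
-- stated objective: alternative
-- what changed: A rescans the incrementally built kept list per alias for a proper-subset token set; B instead indexes every processed alias under each of its tokens (an inverted index, plus a separate list for empty token sets), collects candidates for the current alias from the posting lists of its own tokens, and takes the verified subsuming candidate with the smallest position.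
import Mathlib
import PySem

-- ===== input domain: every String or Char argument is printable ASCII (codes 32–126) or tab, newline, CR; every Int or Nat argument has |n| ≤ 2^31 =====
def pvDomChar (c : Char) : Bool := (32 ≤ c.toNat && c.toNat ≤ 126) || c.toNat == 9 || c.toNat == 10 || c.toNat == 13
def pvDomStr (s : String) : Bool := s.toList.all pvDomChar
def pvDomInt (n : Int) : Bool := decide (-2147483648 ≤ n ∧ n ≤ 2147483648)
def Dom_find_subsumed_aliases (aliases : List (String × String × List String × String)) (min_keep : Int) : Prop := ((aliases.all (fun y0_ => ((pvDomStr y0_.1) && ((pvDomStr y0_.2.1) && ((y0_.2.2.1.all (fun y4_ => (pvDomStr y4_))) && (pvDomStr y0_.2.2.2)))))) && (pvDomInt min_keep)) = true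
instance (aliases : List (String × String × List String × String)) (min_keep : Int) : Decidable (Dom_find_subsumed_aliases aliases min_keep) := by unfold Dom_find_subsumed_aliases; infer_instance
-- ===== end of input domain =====

-- B replaces A's rescanning of the kept list by an inverted token index over all
-- processed aliases, picking the smallest-position subsuming candidate
-- (objective: alternative — a different algorithm of comparable cost).

abbrev PVE := String × String × List String × String
abbrev PVS := String × String × List String × String × String
abbrev PVC := Int × String × List String

-- shared by both ports: the first line of both Pythons is the same sorted(...) call
def pvSortKey (x : PVE) : Int ×ₗ Int := toLex ((x.2.2.1.length : Int), PySem.Str.len x.1)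

-- ===== PORT A =====

-- Python `alias_a_tokens < alias_b_tokens` on sets: proper subset
def is_subsumed_by (alias_a_tokens alias_b_tokens : List String) : Bool :=
  PySem.Set.issubset alias_a_tokens alias_b_tokens && !PySem.Set.equal alias_a_tokens alias_b_tokens

-- the body of A's main loop (inner for-with-break = first match in kept)
def pvStepA (st : List PVE × List PVS) (e : PVE) : List PVE × List PVS :=
  match st.1.find? (fun q => is_subsumed_by q.2.2.1 e.2.2.1) with
  | some q => (st.1, st.2 ++ [(e.1, e.2.1, e.2.2.1, e.2.2.2, q.1)])
  | none => (st.1 ++ [e], st.2)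

-- A's `while len(kept) < min_keep and subsumed: ... subsumed.pop(0) ... kept.append(...)`
def pvFixA (min_keep : Int) : List PVE → List PVS → List PVE × List PVS
  | kept, [] => (kept, [])
  | kept, x :: rest =>
    if (kept.length : Int) < min_keep then
      pvFixA min_keep (kept ++ [(x.1, x.2.1, x.2.2.1, x.2.2.2.1)]) rest
    else (kept, x :: rest)

-- A's trailing min_keep block
def pvFinishA (min_keep : Int) (ks : List PVE × List PVS) : List PVE × List PVS :=
  if (ks.1.length : Int) < min_keep ∧ ks.2 ≠ [] then pvFixA min_keep ks.1 ks.2 else ks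

def find_subsumed_aliases (aliases : List (String × String × List String × String)) (min_keep : Int) : (List (String × String × List String × String)) × (List (String × String × List String × String × String)) :=
  pvFinishA min_keep ((PySem.List.sorted aliases pvSortKey).foldl pvStepA ([], []))

-- ===== PORT B =====

-- toks = sorted(tokens)
def pvCanon (tokens : List String) : List String := PySem.List.sorted tokens (fun s => s)

-- one step of B's `for cand in ...:` loop: keep the subsuming candidate with smallest position
def pvBestStep (tokens : List String) (b : Option PVC) (c : PVC) : Option PVC :=
  if is_subsumed_by c.2.2 tokens then
    match b with
    | none => some c
    | some b' => if c.1 < b'.1 then some c else some b'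
  else b

-- the body of B's main loop (state: token index, empty-set entries, kept, subsumed)
def pvStepB (st : PySem.Dict String (List PVC) × List PVC × List PVE × List PVS)
    (pe : Int × PVE) : PySem.Dict String (List PVC) × List PVC × List PVE × List PVS :=
  let toks := pvCanon pe.2.2.2.1
  let best := (st.2.1 ++ toks.flatMap (fun t => st.1.getD t [])).foldl
    (pvBestStep pe.2.2.2.1) none
  let ks : List PVE × List PVS :=
    match best with
    | some c => (st.2.2.1, st.2.2.2 ++ [(pe.2.1, pe.2.2.1, pe.2.2.2.1, pe.2.2.2.2, c.2.1)])
    | none => (st.2.2.1 ++ [pe.2], st.2.2.2)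
  let entry : PVC := (pe.1, pe.2.1, pe.2.2.2.1)
  if toks ≠ [] then
    (toks.foldl (fun d t => d.modify t [] (· ++ [entry])) st.1, st.2.1, ks)
  else
    (st.1, st.2.1 ++ [entry], ks)

-- `[(a, n, t, x) for (a, n, t, x, _) in moved]` element
def pvStrip (x : PVS) : PVE := (x.1, x.2.1, x.2.2.1, x.2.2.2.1)

-- B's trailing min_keep block (slice-based)
def pvFinishB (min_keep : Int) (ks : List PVE × List PVS) : List PVE × List PVS :=
  if (ks.1.length : Int) < min_keep ∧ ks.2 ≠ [] then
    (ks.1 ++ (PySem.List.slice ks.2 none (some (min_keep - ks.1.length))).map pvStrip,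
     PySem.List.slice ks.2 (some (min_keep - ks.1.length)) none)
  else ks

def find_subsumed_aliases_alt (aliases : List (String × String × List String × String)) (min_keep : Int) : (List (String × String × List String × String)) × (List (String × String × List String × String × String)) :=
  pvFinishB min_keep
    ((PySem.List.enumerate (PySem.List.sorted aliases pvSortKey)).foldl pvStepB
      (PySem.Dict.empty, [], [], [])).2.2

-- ===== PRECONDITION & SPEC =====

-- Pre_ is the set-encoding invariant only: each alias's tokens field is a Python set,
-- so its List String encoding holds distinct elements; no actual Python input is excluded.
def Pre_find_subsumed_aliases (aliases : List (String × String × List String × String)) (min_keep : Int) : Prop :=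
  ∀ e ∈ aliases, e.2.2.1.Nodup
instance (aliases : List (String × String × List String × String)) (min_keep : Int) : Decidable (Pre_find_subsumed_aliases aliases min_keep) := by unfold Pre_find_subsumed_aliases; infer_instance

def pvWitness_find_subsumed_aliases : (List (String × String × List String × String)) × Int :=
  ([("ai", "ai", ["ai"], "t1"), ("ai x", "ai x", ["ai", "x"], "t1"), ("b", "b", ["b"], "t2")], 1)

def Spec_find_subsumed_aliases (aliases : List (String × String × List String × String)) (min_keep : Int) (out : (List (String × String × List String × String)) × (List (String × String × List String × String × String))) : Prop := out = find_subsumed_aliases_alt aliases min_keep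
instance (aliases : List (String × String × List String × String)) (min_keep : Int) (out : (List (String × String × List String × String)) × (List (String × String × List String × String × String))) : Decidable (Spec_find_subsumed_aliases aliases min_keep out) := by
  unfold Spec_find_subsumed_aliases
  exact (@instDecidableEqProd _ _ inferInstance inferInstance) _ _

-- ===== CLAIM (what is proved, stated in full; the proofs are below) =====
def Claim_equal_find_subsumed_aliases : Prop := ∀ (aliases : List (String × String × List String × String)) (min_keep : Int), Dom_find_subsumed_aliases aliases min_keep → Pre_find_subsumed_aliases aliases min_keep → Spec_find_subsumed_aliases aliases min_keep (find_subsumed_aliases aliases min_keep)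

-- ===== LEMMAS AND PROOFS =====

-- `a < b` on sets, propositionally
def pvPSub (a b : List String) : Prop := (∀ x ∈ a, x ∈ b) ∧ ¬(∀ x, x ∈ a ↔ x ∈ b)

theorem pv_psub_iff (a b : List String) : is_subsumed_by a b = true ↔ pvPSub a b := by
  unfold is_subsumed_by pvPSub
  rw [Bool.and_eq_true]
  constructor
  · rintro ⟨h1, h2⟩
    refine ⟨(PySem.Set.issubset_iff a b).mp h1, fun hiff => ?_⟩
    rw [(PySem.Set.equal_iff a b).mpr hiff] at h2
    simp at h2
  · rintro ⟨h1, h2⟩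
    refine ⟨(PySem.Set.issubset_iff a b).mpr h1, ?_⟩
    rw [Bool.not_eq_true']
    rcases heq : PySem.Set.equal a b with _ | _
    · rfl
    · exact absurd ((PySem.Set.equal_iff a b).mp heq) h2

theorem pv_psub_trans {a b c : List String} (h1 : is_subsumed_by a b = true)
    (h2 : is_subsumed_by b c = true) : is_subsumed_by a c = true := by
  rw [pv_psub_iff] at *
  obtain ⟨hab, hnab⟩ := h1; obtain ⟨hbc, hnbc⟩ := h2
  refine ⟨fun x hx => hbc _ (hab _ hx), fun h => hnbc (fun x => ⟨fun hx => hbc _ hx, ?_⟩)⟩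
  intro hx
  exact hab _ ((h x).mpr hx)

theorem pv_canon_perm (t : List String) : (pvCanon t).Perm t :=
  PySem.List.sorted_perm t (fun s => s) false

theorem pv_mem_canon {x : String} {t : List String} : x ∈ pvCanon t ↔ x ∈ t :=
  (pv_canon_perm t).mem_iff

theorem pv_canon_nodup {t : List String} (h : t.Nodup) : (pvCanon t).Nodup :=
  (pv_canon_perm t).nodup_iff.mpr h

theorem pv_canon_eq_nil_iff (t : List String) : pvCanon t = [] ↔ t = [] := by
  constructor
  · intro h
    have hp := pv_canon_perm t
    rw [h] at hp
    exact (hp.symm).eq_nil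
  · intro h
    subst h
    rfl

-- enumerate helpers
theorem pv_enumerate_append (l : List PVE) (e : PVE) : ∀ (p : Int),
    PySem.List.enumerate (l ++ [e]) p = PySem.List.enumerate l p ++ [(p + l.length, e)] := by
  induction l with
  | nil => intro p; simp [PySem.List.enumerate_cons]
  | cons a l ih =>
    intro p
    simp only [List.cons_append, PySem.List.enumerate_cons, ih (p + 1), List.length_cons]
    have h : p + 1 + (l.length : Int) = p + (((l.length : Nat) + 1 : Nat) : Int) := by
      push_cast; ring
    rw [h]

theorem pv_mem_enumerate_ge : ∀ (l : List PVE) (p j : Int) (e : PVE),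
    (j, e) ∈ PySem.List.enumerate l p → p ≤ j := by
  intro l
  induction l with
  | nil => intro p j e h; simp [PySem.List.enumerate] at h
  | cons a l ih =>
    intro p j e h
    rw [PySem.List.enumerate_cons] at h
    rcases List.mem_cons.mp h with h | h
    · rw [Prod.mk.injEq] at h
      omega
    · have := ih (p + 1) j e h
      omega

theorem pv_mem_enumerate_cases (l : List PVE) (a : PVE) (p j : Int) (e : PVE)
    (h : (j, e) ∈ PySem.List.enumerate (a :: l) p) :
    (j = p ∧ e = a) ∨ (j, e) ∈ PySem.List.enumerate l (p + 1) := by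
  rw [PySem.List.enumerate_cons] at h
  rcases List.mem_cons.mp h with h | h
  · rw [Prod.mk.injEq] at h
    exact Or.inl h
  · exact Or.inr h

theorem pv_mem_enumerate_entry (l : List PVE) (p j : Int) (e : PVE)
    (h : (j, e) ∈ PySem.List.enumerate l p) : e ∈ l := by
  have hm := List.mem_map_of_mem (f := (·.2)) h
  rw [PySem.List.map_snd_enumerate] at hm
  exact hm

-- position-tagged selection of the processed prefix (what the index / empties hold)
def pvSel (prev : List PVE) (f : PVE → Bool) : List PVC :=
  ((PySem.List.enumerate prev 0).filter (fun pe => f pe.2)).map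
    (fun pe => (pe.1, pe.2.1, pe.2.2.2.1))

theorem pv_sel_append (prev : List PVE) (e : PVE) (f : PVE → Bool) :
    pvSel (prev ++ [e]) f =
      pvSel prev f ++ (if f e then [((prev.length : Int), e.1, e.2.2.1)] else []) := by
  unfold pvSel
  rw [pv_enumerate_append, List.filter_append, List.map_append]
  congr 1
  cases hf : f e <;> simp [hf]

theorem pv_sel_mem {c : PVC} {prev : List PVE} {f : PVE → Bool} (h : c ∈ pvSel prev f) :
    ∃ e, (c.1, e) ∈ PySem.List.enumerate prev 0 ∧ c = (c.1, e.1, e.2.2.1) := by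
  unfold pvSel at h
  rcases List.mem_map.mp h with ⟨pe, hmem, hc⟩
  rcases List.mem_filter.mp hmem with ⟨hpe, _⟩
  subst hc
  exact ⟨pe.2, by simpa using hpe, rfl⟩

theorem pv_sel_mem_intro {prev : List PVE} {f : PVE → Bool} {j : Int} {e : PVE}
    (h : (j, e) ∈ PySem.List.enumerate prev 0) (hf : f e = true) :
    (j, e.1, e.2.2.1) ∈ pvSel prev f := by
  unfold pvSel
  exact List.mem_map.mpr ⟨(j, e), List.mem_filter.mpr ⟨h, hf⟩, rfl⟩

-- position-tagged first proper-subset predecessor (position, alias, tokens)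
def pvFirstHitE : List PVE → Int → List String → Option PVC
  | [], _, _ => none
  | e :: rest, p, t =>
    if is_subsumed_by e.2.2.1 t then some (p, e.1, e.2.2.1) else pvFirstHitE rest (p + 1) t

theorem pv_firstHitE_none_iff : ∀ (prev : List PVE) (p : Int) (t : List String),
    pvFirstHitE prev p t = none ↔ ∀ r ∈ prev, ¬ is_subsumed_by r.2.2.1 t = true := by
  intro prev
  induction prev with
  | nil => intro p t; simp [pvFirstHitE]
  | cons e rest ih =>
    intro p t
    by_cases hps : is_subsumed_by e.2.2.1 t = true
    · simp [pvFirstHitE, hps]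
    · simp only [pvFirstHitE, if_neg hps, ih (p + 1) t]
      constructor
      · intro h r hr
        rcases List.mem_cons.mp hr with rfl | hr'
        · exact hps
        · exact h r hr'
      · intro h r hr
        exact h r (List.mem_cons_of_mem _ hr)

theorem pv_firstHitE_alias : ∀ (prev : List PVE) (p : Int) (t : List String),
    (pvFirstHitE prev p t).map (·.2.1) =
      (prev.find? (fun r => is_subsumed_by r.2.2.1 t)).map (·.1) := by
  intro prev
  induction prev with
  | nil => intro p t; simp [pvFirstHitE]
  | cons e rest ih =>
    intro p t
    rw [List.find?_cons]
    by_cases hps : is_subsumed_by e.2.2.1 t = true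
    · simp [pvFirstHitE, hps]
    · rw [Bool.not_eq_true] at hps
      simp only [pvFirstHitE, hps]
      exact ih (p + 1) t

theorem pv_hitE_min : ∀ (prev : List PVE) (p : Int) (t : List String) (j : Int) (e : PVE)
    (m' : PVC), (j, e) ∈ PySem.List.enumerate prev p → is_subsumed_by e.2.2.1 t = true →
    pvFirstHitE prev p t = some m' → m'.1 ≤ j ∧ (j = m'.1 → m' = (j, e.1, e.2.2.1)) := by
  intro prev
  induction prev with
  | nil => intro p t j e m' h _ _; simp [PySem.List.enumerate] at h
  | cons a rest ih =>
    intro p t j e m' hmem hps hfh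
    rcases pv_mem_enumerate_cases rest a p j e hmem with ⟨hj, he⟩ | htail
    · subst hj; subst he
      simp only [pvFirstHitE, if_pos hps] at hfh
      have hm := Option.some_injective _ hfh
      exact ⟨le_of_eq (by rw [← hm]), fun _ => hm.symm⟩
    · by_cases hpsa : is_subsumed_by a.2.2.1 t = true
      · simp only [pvFirstHitE, if_pos hpsa] at hfh
        have hm := Option.some_injective _ hfh
        have hj := pv_mem_enumerate_ge rest (p + 1) j e htail
        refine ⟨?_, fun hje => ?_⟩
        · rw [← hm]
          show p ≤ j
          omega
        · exfalso
          rw [← hm] at hje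
          have : j = p := hje
          omega
      · simp only [pvFirstHitE, if_neg hpsa] at hfh
        exact ih (p + 1) t j e m' htail hps hfh

theorem pv_hitE_mem : ∀ (prev : List PVE) (p : Int) (t : List String) (m' : PVC),
    pvFirstHitE prev p t = some m' →
    ∃ e, (m'.1, e) ∈ PySem.List.enumerate prev p ∧ is_subsumed_by e.2.2.1 t = true ∧
      m' = (m'.1, e.1, e.2.2.1) := by
  intro prev
  induction prev with
  | nil => intro p t m' h; simp [pvFirstHitE] at h
  | cons a rest ih =>
    intro p t m' hfh
    by_cases hps : is_subsumed_by a.2.2.1 t = true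
    · simp only [pvFirstHitE, if_pos hps] at hfh
      have hm := Option.some_injective _ hfh
      refine ⟨a, ?_, hps, by rw [← hm]⟩
      rw [PySem.List.enumerate_cons, ← hm]
      exact List.mem_cons_self
    · simp only [pvFirstHitE, if_neg hps] at hfh
      obtain ⟨e, hm, hq, he⟩ := ih (p + 1) t m' hfh
      refine ⟨e, ?_, hq, he⟩
      rw [PySem.List.enumerate_cons]
      exact List.mem_cons_of_mem _ hm

theorem pv_bestFold_none (t : List String) : ∀ (L : List PVC) (b : Option PVC),
    (∀ c ∈ L, is_subsumed_by c.2.2 t = false) → L.foldl (pvBestStep t) b = b := by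
  intro L
  induction L with
  | nil => intro b _; rfl
  | cons c L' ih =>
    intro b h
    have hstep : pvBestStep t b c = b := by
      simp [pvBestStep, h c List.mem_cons_self]
    rw [List.foldl_cons, hstep]
    exact ih b (fun c' hc' => h c' (List.mem_cons_of_mem _ hc'))

theorem pv_bestFold_min (t : List String) (m : PVC) : ∀ (L : List PVC) (b : Option PVC),
    (∀ c ∈ L, is_subsumed_by c.2.2 t = true → m.1 ≤ c.1 ∧ (c.1 = m.1 → c = m)) →
    (∀ b', b = some b' → m.1 ≤ b'.1 ∧ (b'.1 = m.1 → b' = m)) →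
    ((∃ c ∈ L, is_subsumed_by c.2.2 t = true ∧ c = m) ∨ b = some m) →
    L.foldl (pvBestStep t) b = some m := by
  intro L
  induction L with
  | nil =>
    intro b _ _ hin
    rcases hin with ⟨c, hc, _⟩ | rfl
    · exact absurd hc List.not_mem_nil
    · rfl
  | cons c L' ih =>
    intro b hmin hb hin
    rw [List.foldl_cons]
    have hmin' := fun c' hc' => hmin c' (List.mem_cons_of_mem _ hc')
    by_cases hq : is_subsumed_by c.2.2 t = true
    · have hmc := hmin c List.mem_cons_self hq
      cases b with
      | none =>
        have hstep : pvBestStep t none c = some c := by simp [pvBestStep, hq]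
        rw [hstep]
        by_cases hcm : c = m
        · exact ih (some c) hmin'
            (fun b'' hb'' => by cases hb''; exact ⟨le_of_eq (by rw [hcm]), fun _ => hcm⟩)
            (Or.inr (by rw [hcm]))
        · rcases hin with ⟨c0, hc0mem, hc0q, hc0m⟩ | habs
          · rcases List.mem_cons.mp hc0mem with rfl | hmem'
            · exact absurd hc0m hcm
            · exact ih (some c) hmin'
                (fun b'' hb'' => by cases hb''; exact hmc) (Or.inl ⟨c0, hmem', hc0q, hc0m⟩)
          · cases habs
      | some b0 =>
        have hb0 := hb b0 rfl
        have hstep : pvBestStep t (some b0) c = (if c.1 < b0.1 then some c else some b0) := by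
          simp [pvBestStep, hq]
        rw [hstep]
        have hbnew : ∀ b'', (if c.1 < b0.1 then some c else some b0) = some b'' →
            m.1 ≤ b''.1 ∧ (b''.1 = m.1 → b'' = m) := by
          intro b'' hb''
          split_ifs at hb'' <;> cases hb''
          · exact hmc
          · exact hb0
        refine ih _ hmin' hbnew ?_
        rcases hin with ⟨c0, hc0mem, hc0q, hc0m⟩ | hbm
        · rcases List.mem_cons.mp hc0mem with heq | hmem'
          · have hcm : c = m := heq ▸ hc0m
            by_cases hcmp : c.1 < b0.1
            · rw [if_pos hcmp]; exact Or.inr (by rw [hcm])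
            · rw [if_neg hcmp]
              have h1 := hb0.1
              have hc1 : c.1 = m.1 := by rw [hcm]
              have hbm2 : b0 = m := hb0.2 (by omega)
              rw [hbm2]; exact Or.inr rfl
          · exact Or.inl ⟨c0, hmem', hc0q, hc0m⟩
        · have hb0m : b0 = m := Option.some_injective _ hbm
          subst hb0m
          have hnlt : ¬ c.1 < b0.1 := by have := hmc.1; omega
          rw [if_neg hnlt]
          exact Or.inr rfl
    · have hstep : pvBestStep t b c = b := by simp [pvBestStep, hq]
      rw [hstep]
      refine ih b hmin' hb ?_
      rcases hin with ⟨c0, hc0mem, hc0q, hc0m⟩ | hbm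
      · rcases List.mem_cons.mp hc0mem with rfl | hmem'
        · exact absurd hc0q hq
        · exact Or.inl ⟨c0, hmem', hc0q, hc0m⟩
      · exact Or.inr hbm

theorem pv_best_eq (idx : PySem.Dict String (List PVC)) (emp : List PVC) (prev : List PVE)
    (T : List String)
    (hpost : ∀ x, idx.getD x [] = pvSel prev (fun r => decide (x ∈ r.2.2.1)))
    (hemp : emp = pvSel prev (fun r => decide (r.2.2.1 = []))) :
    (emp ++ (pvCanon T).flatMap (fun x => idx.getD x [])).foldl (pvBestStep T) none =
      pvFirstHitE prev 0 T := by
  have hcand : ∀ c ∈ emp ++ (pvCanon T).flatMap (fun x => idx.getD x []),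
      ∃ e, (c.1, e) ∈ PySem.List.enumerate prev 0 ∧ c = (c.1, e.1, e.2.2.1) := by
    intro c hc
    rcases List.mem_append.mp hc with hc | hc
    · rw [hemp] at hc
      exact pv_sel_mem hc
    · rcases List.mem_flatMap.mp hc with ⟨x, _, hcx⟩
      rw [hpost x] at hcx
      exact pv_sel_mem hcx
  cases hfh : pvFirstHitE prev 0 T with
  | none =>
    apply pv_bestFold_none
    intro c hc
    obtain ⟨e, hmem, hce⟩ := hcand c hc
    have hepre : e ∈ prev := pv_mem_enumerate_entry _ _ _ _ hmem
    rcases hq : is_subsumed_by c.2.2 T with _ | _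
    · rfl
    · exfalso
      rw [hce] at hq
      exact (pv_firstHitE_none_iff prev 0 T).mp hfh e hepre hq
  | some m' =>
    obtain ⟨e0, hm0, hq0, he0⟩ := pv_hitE_mem prev 0 T m' hfh
    apply pv_bestFold_min
    · intro c hc hq
      obtain ⟨e, hmem, hce⟩ := hcand c hc
      have hqe : is_subsumed_by e.2.2.1 T = true := by rw [hce] at hq; exact hq
      have hmin := pv_hitE_min prev 0 T c.1 e m' hmem hqe hfh
      refine ⟨hmin.1, fun h1 => ?_⟩
      rw [hce]
      exact (hmin.2 h1).symm
    · intro b' hb'; cases hb'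
    · by_cases hnil : e0.2.2.1 = []
      · refine Or.inl ⟨m', List.mem_append.mpr (Or.inl ?_), ?_, rfl⟩
        · rw [hemp, he0]
          exact pv_sel_mem_intro hm0 (by simp [hnil])
        · rw [he0]
          exact hq0
      · obtain ⟨x, hx⟩ := List.exists_mem_of_ne_nil _ hnil
        have hxT : x ∈ T := ((pv_psub_iff _ _).mp hq0).1 x hx
        refine Or.inl ⟨m', List.mem_append.mpr (Or.inr ?_), ?_, rfl⟩
        · refine List.mem_flatMap.mpr ⟨x, pv_mem_canon.mpr hxT, ?_⟩
          rw [hpost x, he0]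
          exact pv_sel_mem_intro hm0 (by simp [hx])
        · rw [he0]
          exact hq0

-- the common specification fold: state (processed prefix, kept, subsumed);
-- the redundancy test scans the whole prefix
def pvSpecF (st : List PVE × List PVE × List PVS) (e : PVE) : List PVE × List PVE × List PVS :=
  match st.1.find? (fun r => is_subsumed_by r.2.2.1 e.2.2.1) with
  | some q => (st.1 ++ [e], st.2.1, st.2.2 ++ [(e.1, e.2.1, e.2.2.1, e.2.2.2, q.1)])
  | none => (st.1 ++ [e], st.2.1 ++ [e], st.2.2)

theorem pv_A_fold : ∀ (l : List PVE) (prev kept : List PVE) (subs : List PVS),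
    (∀ t, kept.find? (fun q => is_subsumed_by q.2.2.1 t) =
          prev.find? (fun r => is_subsumed_by r.2.2.1 t)) →
    l.foldl pvStepA (kept, subs) = (l.foldl pvSpecF (prev, kept, subs)).2 := by
  intro l
  induction l with
  | nil => intro prev kept subs _; rfl
  | cons e l' ih =>
    intro prev kept subs H
    rw [List.foldl_cons, List.foldl_cons]
    have heq := H e.2.2.1
    cases hf : prev.find? (fun r => is_subsumed_by r.2.2.1 e.2.2.1) with
    | some q =>
      rw [show pvStepA (kept, subs) e = (kept, subs ++ [(e.1, e.2.1, e.2.2.1, e.2.2.2, q.1)]) from by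
            rw [hf] at heq; simp [pvStepA, heq],
          show pvSpecF (prev, kept, subs) e =
              (prev ++ [e], kept, subs ++ [(e.1, e.2.1, e.2.2.1, e.2.2.2, q.1)]) from by
            simp [pvSpecF, hf]]
      apply ih
      intro t
      rw [List.find?_append, H t]
      cases hft : prev.find? (fun r => is_subsumed_by r.2.2.1 t) with
      | some q' => rfl
      | none =>
        have hq := List.find?_some hf
        have hqm := List.mem_of_find?_eq_some hf
        by_cases hpe : is_subsumed_by e.2.2.1 t = true
        · exact absurd (pv_psub_trans hq hpe) (List.find?_eq_none.mp hft q hqm)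
        · simp [List.find?_nil, hpe]
    | none =>
      rw [show pvStepA (kept, subs) e = (kept ++ [e], subs) from by
            rw [hf] at heq; simp [pvStepA, heq],
          show pvSpecF (prev, kept, subs) e = (prev ++ [e], kept ++ [e], subs) from by
            simp [pvSpecF, hf]]
      apply ih
      intro t
      rw [List.find?_append, List.find?_append, H t]

theorem pv_fold_modify_getD (entry : PVC) : ∀ (toks : List String), toks.Nodup →
    ∀ (d : PySem.Dict String (List PVC)) (x : String),
    (toks.foldl (fun d t => d.modify t [] (· ++ [entry])) d).getD x [] =
      d.getD x [] ++ (if x ∈ toks then [entry] else []) := by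
  intro toks
  induction toks with
  | nil => intro _ d x; simp
  | cons t toks ih =>
    intro hnd d x
    rcases List.nodup_cons.mp hnd with ⟨ht, htl⟩
    rw [List.foldl_cons, ih htl]
    by_cases hxt : x = t
    · subst hxt
      rw [PySem.Dict.getD_modify_self]
      simp [ht]
    · rw [PySem.Dict.getD_modify_of_ne _ _ _ hxt]
      by_cases hxm : x ∈ toks
      · simp [hxm, hxt]
      · simp [hxm, hxt]

theorem pv_B_fold : ∀ (l prev kept : List PVE) (subs : List PVS) (emp : List PVC)
    (idx : PySem.Dict String (List PVC)),
    (∀ x, idx.getD x [] = pvSel prev (fun r => decide (x ∈ r.2.2.1))) →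
    (emp = pvSel prev (fun r => decide (r.2.2.1 = []))) →
    (∀ e ∈ l, e.2.2.1.Nodup) →
    ((PySem.List.enumerate l (prev.length : Int)).foldl pvStepB (idx, emp, kept, subs)).2.2 =
      (l.foldl pvSpecF (prev, kept, subs)).2 := by
  intro l
  induction l with
  | nil =>
    intro prev kept subs emp idx _ _ _
    rfl
  | cons e l' ih =>
    intro prev kept subs emp idx hpost hemp hndl
    rw [PySem.List.enumerate_cons, List.foldl_cons, List.foldl_cons]
    have hbest :
        (emp ++ (pvCanon e.2.2.1).flatMap (fun x => idx.getD x [])).foldl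
            (pvBestStep e.2.2.1) none = pvFirstHitE prev 0 e.2.2.1 :=
      pv_best_eq idx emp prev e.2.2.1 hpost hemp
    have hndtoks : (pvCanon e.2.2.1).Nodup := pv_canon_nodup (hndl e List.mem_cons_self)
    -- the appended entry
    have hlen1 : (prev.length : Int) + 1 = (((prev ++ [e]).length : Nat) : Int) := by simp
    have hndl' : ∀ x ∈ l', x.2.2.1.Nodup := fun x hx => hndl x (List.mem_cons_of_mem _ hx)
    -- invariant preservation for the index / empties
    have hpost' : ∀ (x : String),
        (if pvCanon e.2.2.1 ≠ [] then
            (pvCanon e.2.2.1).foldl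
              (fun d t => d.modify t [] (· ++ [((prev.length : Int), e.1, e.2.2.1)])) idx
          else idx).getD x [] =
          pvSel (prev ++ [e]) (fun r => decide (x ∈ r.2.2.1)) := by
      intro x
      rw [pv_sel_append]
      by_cases hnil : pvCanon e.2.2.1 = []
      · rw [if_neg (by simpa using hnil)]
        have : (x ∈ e.2.2.1) = False := by
          simp [(pv_canon_eq_nil_iff e.2.2.1).mp hnil]
        simp [hpost x, this]
      · rw [if_pos hnil]
        rw [pv_fold_modify_getD _ _ hndtoks idx x, hpost x]
        by_cases hxm : x ∈ e.2.2.1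
        · have h1 : x ∈ pvCanon e.2.2.1 := pv_mem_canon.mpr hxm
          simp [h1, hxm]
        · have h1 : x ∉ pvCanon e.2.2.1 := fun h => hxm (pv_mem_canon.mp h)
          simp [h1, hxm]
    have hemp' :
        (if pvCanon e.2.2.1 ≠ [] then emp
          else emp ++ [((prev.length : Int), e.1, e.2.2.1)]) =
          pvSel (prev ++ [e]) (fun r => decide (r.2.2.1 = [])) := by
      rw [pv_sel_append]
      by_cases hnil : pvCanon e.2.2.1 = []
      · rw [if_neg (by simpa using hnil)]
        have : (e.2.2.1 = []) = True := by
          simp [(pv_canon_eq_nil_iff e.2.2.1).mp hnil]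
        simp [hemp, this]
      · rw [if_pos hnil]
        have hne : ¬ e.2.2.1 = [] := fun h => hnil ((pv_canon_eq_nil_iff e.2.2.1).mpr h)
        simp [hemp, hne]
    cases hf : prev.find? (fun r => is_subsumed_by r.2.2.1 e.2.2.1) with
    | some q =>
      have halias := pv_firstHitE_alias prev 0 e.2.2.1
      rw [hf] at halias
      cases hfh : pvFirstHitE prev 0 e.2.2.1 with
      | none => rw [hfh] at halias; simp at halias
      | some c =>
        rw [hfh] at halias
        simp only [Option.map_some] at halias
        have hc21 : c.2.1 = q.1 := by injection halias
        rw [show pvStepB (idx, emp, kept, subs) ((prev.length : Int), e) =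
              ((if pvCanon e.2.2.1 ≠ [] then
                  (pvCanon e.2.2.1).foldl
                    (fun d t => d.modify t [] (· ++ [((prev.length : Int), e.1, e.2.2.1)])) idx
                else idx),
               (if pvCanon e.2.2.1 ≠ [] then emp
                else emp ++ [((prev.length : Int), e.1, e.2.2.1)]),
               kept, subs ++ [(e.1, e.2.1, e.2.2.1, e.2.2.2, q.1)]) from by
              simp only [pvStepB, hbest, hfh, hc21]
              split_ifs <;> rfl,
            show pvSpecF (prev, kept, subs) e =
              (prev ++ [e], kept, subs ++ [(e.1, e.2.1, e.2.2.1, e.2.2.2, q.1)]) from by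
              simp [pvSpecF, hf],
            hlen1]
        exact ih (prev ++ [e]) kept _ _ _ hpost' hemp' hndl'
    | none =>
      have halias := pv_firstHitE_alias prev 0 e.2.2.1
      rw [hf] at halias
      cases hfh : pvFirstHitE prev 0 e.2.2.1 with
      | some c => rw [hfh] at halias; simp at halias
      | none =>
        rw [show pvStepB (idx, emp, kept, subs) ((prev.length : Int), e) =
              ((if pvCanon e.2.2.1 ≠ [] then
                  (pvCanon e.2.2.1).foldl
                    (fun d t => d.modify t [] (· ++ [((prev.length : Int), e.1, e.2.2.1)])) idx
                else idx),
               (if pvCanon e.2.2.1 ≠ [] then emp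
                else emp ++ [((prev.length : Int), e.1, e.2.2.1)]),
               kept ++ [e], subs) from by
              simp only [pvStepB, hbest, hfh]
              split_ifs <;> rfl,
            show pvSpecF (prev, kept, subs) e = (prev ++ [e], kept ++ [e], subs) from by
              simp [pvSpecF, hf],
            hlen1]
        exact ih (prev ++ [e]) (kept ++ [e]) _ _ _ hpost' hemp' hndl'

theorem pv_fixA_stop (mk : Int) (kept : List PVE) (subs : List PVS)
    (h : ¬ (kept.length : Int) < mk) : pvFixA mk kept subs = (kept, subs) := by
  cases subs <;> simp [pvFixA, h]

theorem pv_fixA_eq (mk : Int) : ∀ (subs : List PVS) (kept : List PVE),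
    (kept.length : Int) < mk →
    pvFixA mk kept subs =
      (kept ++ (subs.take (mk - kept.length).toNat).map pvStrip,
       subs.drop (mk - kept.length).toNat) := by
  intro subs
  induction subs with
  | nil => intro kept h; simp [pvFixA]
  | cons x rest ih =>
    intro kept h
    rw [show pvFixA mk kept (x :: rest) =
          pvFixA mk (kept ++ [(x.1, x.2.1, x.2.2.1, x.2.2.2.1)]) rest from by
          simp [pvFixA, h]]
    by_cases h2 : ((kept ++ [(x.1, x.2.1, x.2.2.1, x.2.2.2.1)]).length : Int) < mk
    · rw [ih _ h2]
      have hlen : (kept ++ [(x.1, x.2.1, x.2.2.1, x.2.2.2.1)]).length = kept.length + 1 := by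
        simp
      rw [hlen] at h2 ⊢
      have ht : (mk - (kept.length : Int)).toNat = (mk - ((kept.length : Int) + 1)).toNat + 1 := by
        push_cast at h2
        omega
      have hc : ((kept.length + 1 : Nat) : Int) = (kept.length : Int) + 1 := by push_cast; ring
      rw [hc, ht, List.take_succ_cons, List.map_cons, List.drop_succ_cons]
      simp [pvStrip]
    · rw [pv_fixA_stop mk _ rest h2]
      have hlen : (kept ++ [(x.1, x.2.1, x.2.2.1, x.2.2.2.1)]).length = kept.length + 1 := by
        simp
      rw [hlen] at h2
      have ht : (mk - (kept.length : Int)).toNat = 1 := by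
        push_cast at h2
        omega
      rw [ht]
      simp [pvStrip]

theorem pv_finish_eq (mk : Int) (ks : List PVE × List PVS) :
    pvFinishA mk ks = pvFinishB mk ks := by
  unfold pvFinishA pvFinishB
  split_ifs with h
  · obtain ⟨h1, _⟩ := h
    rw [PySem.List.slice_to _ (by omega), PySem.List.slice_from _ (by omega),
      pv_fixA_eq mk ks.2 ks.1 h1]
  · rfl

-- ===== VERDICT (by name: the statement is the Claim_ definition above) =====
theorem find_subsumed_aliases_spec : Claim_equal_find_subsumed_aliases := by
  intro aliases min_keep _hdom hpre
  unfold Spec_find_subsumed_aliases find_subsumed_aliases find_subsumed_aliases_alt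
  have hnd : ∀ e ∈ PySem.List.sorted aliases pvSortKey, e.2.2.1.Nodup := by
    intro e he
    exact hpre e ((PySem.List.sorted_perm aliases pvSortKey false).subset he)
  have hA := pv_A_fold (PySem.List.sorted aliases pvSortKey) [] [] [] (fun t => rfl)
  have hB := pv_B_fold (PySem.List.sorted aliases pvSortKey) [] [] [] [] PySem.Dict.empty
    (fun x => by simp [PySem.Dict.getD_empty, pvSel, PySem.List.enumerate])
    (by simp [pvSel, PySem.List.enumerate]) hnd
  simp only [List.length_nil, Nat.cast_zero] at hB
  rw [hA, hB, pv_finish_eq]
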